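-- pv_equiv track=rewrite | github.com/noahjacknichols/cp460 | A2/solution_A2.py | insert_nonalpha
-- ===== SOURCE A (Python) =====
-- def insert_nonalpha(text, nonAlpha):
--     # your code here
--     modifiedText = text
--     for i in range(len(nonAlpha)):
--         for j in range(len(text)):
--             entry = nonAlpha[i]
--             if(entry[1] == j):
--                 modifiedText = modifiedText[:j] + entry[0] + modifiedText[j:]
--     return modifiedText
-- ===== SOURCE B (Python) =====
-- def insert_nonalpha(text, nonAlpha):
--     n = len(text)
--     buf = list(text)
--     for s, p in nonAlpha:
--         if 0 <= p < n:
--             buf[p:p] = s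
--     return ''.join(buf)
-- ===== Notes on version B (the rewrite author's own statement) =====
-- stated objective: faster
-- what changed: B drops A's inner scan over all text positions per entry and its repeated full-string reslicing: it splices each entry's string directly into a char list at position entry[1] (skipping out-of-range positions) and joins once.
import Mathlib
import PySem

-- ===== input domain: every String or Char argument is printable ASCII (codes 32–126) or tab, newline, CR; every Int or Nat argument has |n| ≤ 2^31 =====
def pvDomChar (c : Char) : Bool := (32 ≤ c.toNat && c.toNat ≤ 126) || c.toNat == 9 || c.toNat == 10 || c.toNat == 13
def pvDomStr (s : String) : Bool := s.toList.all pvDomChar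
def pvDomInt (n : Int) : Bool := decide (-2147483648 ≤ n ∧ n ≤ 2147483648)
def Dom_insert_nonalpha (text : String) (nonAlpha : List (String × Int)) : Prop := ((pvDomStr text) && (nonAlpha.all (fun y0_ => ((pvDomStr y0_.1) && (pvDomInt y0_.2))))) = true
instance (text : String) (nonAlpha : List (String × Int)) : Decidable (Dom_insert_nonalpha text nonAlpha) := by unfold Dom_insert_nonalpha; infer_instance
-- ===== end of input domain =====

-- B replaces A's inner scan over every text position (and full-string reslicing) by a direct
-- splice of each entry at its position into a char list; equivalence of the return values is proved.

-- ===== PORT A =====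
-- literal port of A: outer loop over range(len(nonAlpha)), inner loop over range(len(text)),
-- insertion via slices modifiedText[:j] + entry[0] + modifiedText[j:]
def insert_nonalpha (text : String) (nonAlpha : List (String × Int)) : String :=
  String.ofList <|
    (PySem.List.pyRange 0 (nonAlpha.length : Int) 1).foldl
      (fun mt i =>
        (PySem.List.pyRange 0 (text.toList.length : Int) 1).foldl
          (fun mt j =>
            if (PySem.List.pyGetD nonAlpha i ("", 0)).2 = j then
              PySem.List.slice mt none (some j) ++ (PySem.List.pyGetD nonAlpha i ("", 0)).1.toList
                ++ PySem.List.slice mt (some j) none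
            else mt)
          mt)
      text.toList

-- ===== PORT B =====
-- literal port of B: one pass over nonAlpha, splicing buf[p:p] = s when 0 <= p < len(text)
def insert_nonalpha_alt (text : String) (nonAlpha : List (String × Int)) : String :=
  let n : Int := text.toList.length
  String.ofList <|
    nonAlpha.foldl
      (fun buf sp =>
        if 0 ≤ sp.2 ∧ sp.2 < n then
          buf.take sp.2.toNat ++ sp.1.toList ++ buf.drop sp.2.toNat
        else buf)
      text.toList

-- ===== PRECONDITION & SPEC =====
def Spec_insert_nonalpha (text : String) (nonAlpha : List (String × Int)) (out : String) : Prop := out = insert_nonalpha_alt text nonAlpha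
instance (text : String) (nonAlpha : List (String × Int)) (out : String) : Decidable (Spec_insert_nonalpha text nonAlpha out) := by unfold Spec_insert_nonalpha; infer_instance

-- ===== CLAIM (what is proved, stated in full; the proofs are below) =====
def Claim_equal_insert_nonalpha : Prop := ∀ (text : String) (nonAlpha : List (String × Int)), Dom_insert_nonalpha text nonAlpha → Spec_insert_nonalpha text nonAlpha (insert_nonalpha text nonAlpha)

-- ===== LEMMAS AND PROOFS =====

-- a guarded fold whose guard never fires leaves the accumulator unchanged
theorem foldl_guard_noop (l : List Int) (p : Int) (g : List Char → Int → List Char)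
    (mt : List Char) (h : ∀ j ∈ l, ¬ p = j) :
    l.foldl (fun mt j => if p = j then g mt j else mt) mt = mt := by
  induction l generalizing mt with
  | nil => rfl
  | cons a l ih =>
    rw [List.foldl_cons, if_neg (h a (by simp))]
    exact ih mt (fun j hj => h j (by simp [hj]))

-- A's inner loop over all text positions is one conditional splice
theorem inner_loop_eq (n p : Int) (s mt : List Char) :
    (PySem.List.pyRange 0 n 1).foldl
      (fun mt j =>
        if p = j then
          PySem.List.slice mt none (some j) ++ s ++ PySem.List.slice mt (some j) none
        else mt) mt
    = if 0 ≤ p ∧ p < n then mt.take p.toNat ++ s ++ mt.drop p.toNat else mt := by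
  by_cases h : 0 ≤ p ∧ p < n
  · rw [if_pos h]
    rw [PySem.List.pyRange_one_append 0 p n h.1 (le_of_lt h.2),
        PySem.List.pyRange_one_cons h.2, List.foldl_append, List.foldl_cons]
    rw [foldl_guard_noop _ p _ mt
        (fun j hj => by rw [PySem.List.mem_pyRange_one] at hj; omega)]
    rw [if_pos rfl, PySem.List.slice_to mt h.1, PySem.List.slice_from mt h.1]
    exact foldl_guard_noop _ p _ _
        (fun j hj => by rw [PySem.List.mem_pyRange_one] at hj; omega)
  · rw [if_neg h]
    exact foldl_guard_noop _ p _ mt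
        (fun j hj => by rw [PySem.List.mem_pyRange_one] at hj; omega)

-- ===== VERDICT (by name: the statement is the Claim_ definition above) =====
theorem insert_nonalpha_spec : Claim_equal_insert_nonalpha := by
  intro text nonAlpha _
  unfold Spec_insert_nonalpha insert_nonalpha insert_nonalpha_alt
  dsimp only
  rw [PySem.List.foldl_pyRange_zero_pyGetD' nonAlpha ("", 0)
      (fun mt (entry : String × Int) =>
        (PySem.List.pyRange 0 (text.toList.length : Int) 1).foldl
          (fun mt j =>
            if entry.2 = j then
              PySem.List.slice mt none (some j) ++ entry.1.toList ++ PySem.List.slice mt (some j) none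
            else mt) mt)
      text.toList]
  congr 1
  apply List.foldl_ext
  intro mt sp _
  exact inner_loop_eq _ sp.2 sp.1.toList mt
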